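-- pv_equiv track=rewrite | github.com/n-pham/dsa | freecodecamp_202509.py | too_much_screen_time
-- ===== SOURCE A (Python) =====
-- def too_much_screen_time(hours):
--     total = 0
--     for index, hour in enumerate(hours):
--         if hour >= 10:
--             return True
--         if index >= 2 and hours[index - 2] + hours[index - 1] + hour >= 8 * 3:
--             return True
--         total += hour
--     if total >= 6 * 7:
--         return True
--     return False
-- ===== SOURCE B (Python) =====
-- def too_much_screen_time(hours):
--     peak = max(hours, default=0)
--     windows = [a + b + c for a, b, c in zip(hours, hours[1:], hours[2:])]
--     busiest = max(windows, default=0)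
--     return peak >= 10 or busiest >= 24 or sum(hours) >= 42
-- ===== Notes on version B (the rewrite author's own statement) =====
-- stated objective: alternative
-- what changed: Replaces A's fused early-return scan (running total plus per-index window checks against hours[i-2..i]) by an aggregate-then-compare computation: the peak hour via max, an explicit list of 3-day window sums built by zipping three shifted views of the list, its max, and one final triple comparison with no loop over indices and no early returns.
import Mathlib
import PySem

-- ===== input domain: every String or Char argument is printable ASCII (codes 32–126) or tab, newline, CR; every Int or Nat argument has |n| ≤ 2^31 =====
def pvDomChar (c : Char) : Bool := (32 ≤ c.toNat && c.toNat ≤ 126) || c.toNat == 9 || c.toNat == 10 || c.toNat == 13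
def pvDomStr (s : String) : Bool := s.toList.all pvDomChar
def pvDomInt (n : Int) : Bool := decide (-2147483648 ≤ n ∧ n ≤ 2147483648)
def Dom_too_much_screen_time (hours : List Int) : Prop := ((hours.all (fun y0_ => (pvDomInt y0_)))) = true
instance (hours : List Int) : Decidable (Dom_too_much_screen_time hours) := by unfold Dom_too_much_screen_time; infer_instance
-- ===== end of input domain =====

-- B replaces A's fused early-return scan by an aggregate-then-compare computation (peak hour via max, explicit 3-day window sums via zipping shifted views, one final comparison): an alternative decomposition, same O(n) cost.


-- ===== PORT A =====
-- A's loop over enumerate(hours) carrying the running total, with both early returns.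
def tooA_loop (hours : List Int) : List (Int × Int) → Int → Bool
  | [], total => decide (total ≥ 6 * 7)
  | (index, hour) :: rest, total =>
    if hour ≥ 10 then true
    else if index ≥ 2 ∧
        PySem.List.pyGetD hours (index - 2) 0 + PySem.List.pyGetD hours (index - 1) 0 + hour ≥ 8 * 3 then true
    else tooA_loop hours rest (total + hour)

def too_much_screen_time (hours : List Int) : Bool :=
  tooA_loop hours (PySem.List.enumerate hours 0) 0

-- ===== PORT B =====
-- the comprehension [a + b + c for a, b, c in zip(hours, hours[1:], hours[2:])], exact: zip truncates to the shortest list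
def zip3Sums : List Int → List Int → List Int → List Int
  | a :: as, b :: bs, c :: cs => (a + b + c) :: zip3Sums as bs cs
  | _, _, _ => []

def too_much_screen_time_alt (hours : List Int) : Bool :=
  let peak := PySem.List.maxD hours (fun x => x) 0
  let windows := zip3Sums hours
      (PySem.List.slice hours (some 1) none) (PySem.List.slice hours (some 2) none)
  let busiest := PySem.List.maxD windows (fun x => x) 0
  decide (peak ≥ 10) || decide (busiest ≥ 24) || decide (hours.sum ≥ 42)

-- ===== PRECONDITION & SPEC =====
def Spec_too_much_screen_time (hours : List Int) (out : Bool) : Prop := out = too_much_screen_time_alt hours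
instance (hours : List Int) (out : Bool) : Decidable (Spec_too_much_screen_time hours out) := by unfold Spec_too_much_screen_time; infer_instance

-- ===== CLAIM (what is proved, stated in full; the proofs are below) =====
def Claim_equal_too_much_screen_time : Prop := ∀ (hours : List Int), Dom_too_much_screen_time hours → Spec_too_much_screen_time hours (too_much_screen_time hours)

-- ===== LEMMAS AND PROOFS =====

-- A's per-index window check, as a predicate on the index.
def winB (hours : List Int) (i : Int) : Bool :=
  decide (PySem.List.pyGetD hours (i - 2) 0 + PySem.List.pyGetD hours (i - 1) 0 + PySem.List.pyGetD hours i 0 ≥ 24)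

-- Invariant of A's loop: starting at position s with accumulator `total`, the loop decides
-- the disjunction of the three checks restricted to the remaining suffix.
lemma tooA_loop_eq (hours : List Int) (suf : List Int) (s : Nat) (total : Int)
    (hdrop : hours.drop s = suf) :
    tooA_loop hours (PySem.List.enumerate suf (s : Int)) total =
      (suf.any (fun h => h ≥ 10)
        || (PySem.List.pyRange (max 2 (s : Int)) (hours.length : Int) 1).any (winB hours)
        || decide (total + suf.sum ≥ 42)) := by
  induction suf generalizing s total with
  | nil =>
    have hlen : hours.length ≤ s := by
      by_contra hlt
      have := List.drop_eq_nil_iff.mp hdrop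
      omega
    rw [PySem.List.pyRange_one_eq_nil (by omega), PySem.List.enumerate_nil]
    simp only [tooA_loop, List.any_nil, List.sum_nil, Bool.false_or, add_zero]
    norm_num
  | cons h rest ih =>
    have hs_lt : s < hours.length := by
      by_contra hge
      have : hours.drop s = [] := List.drop_eq_nil_iff.mpr (by omega)
      rw [this] at hdrop; cases hdrop
    have hget : hours[s]? = some h := by
      have h0 := congrArg (fun l : List Int => l[0]?) hdrop
      simpa [List.getElem?_drop] using h0
    have hgetD : PySem.List.pyGetD hours (s : Int) 0 = h := by
      rw [PySem.List.pyGetD_natCast]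
      simp [List.getD, hget]
    have hdrop' : hours.drop (s + 1) = rest := by
      have h1 : (hours.drop s).drop 1 = hours.drop (s + 1) := by rw [List.drop_drop]
      rw [← h1, hdrop, List.drop_one, List.tail_cons]
    rw [PySem.List.enumerate_cons]
    show (if h ≥ 10 then true
      else if (s : Int) ≥ 2 ∧
          PySem.List.pyGetD hours ((s : Int) - 2) 0 + PySem.List.pyGetD hours ((s : Int) - 1) 0 + h ≥ 8 * 3 then true
      else tooA_loop hours (PySem.List.enumerate rest ((s : Int) + 1)) (total + h)) = _
    have hcast : ((s : Int) + 1) = ((s + 1 : Nat) : Int) := by push_cast; ring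
    by_cases h10 : h ≥ 10
    · simp [h10]
    · by_cases hs2 : 2 ≤ s
      · -- guard index ≥ 2 is live; split the range at s
        have hmax : max 2 (s : Int) = (s : Int) := by omega
        have hmax' : max 2 ((s + 1 : Nat) : Int) = (s : Int) + 1 := by push_cast; omega
        rw [hmax, PySem.List.pyRange_one_cons (by exact_mod_cast hs_lt)]
        by_cases hwin : PySem.List.pyGetD hours ((s : Int) - 2) 0 + PySem.List.pyGetD hours ((s : Int) - 1) 0 + h ≥ 8 * 3
        · have hwinB : winB hours (s : Int) = true := by
            simp only [winB, hgetD, decide_eq_true_iff]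
            omega
          rw [if_neg h10, if_pos ⟨by exact_mod_cast hs2, hwin⟩]
          simp [hwinB]
        · have hwinB : winB hours (s : Int) = false := by
            simp only [winB, hgetD, decide_eq_false_iff_not]
            omega
          rw [hcast] at *
          rw [if_neg h10, if_neg (by push_cast; omega), ih (s + 1) (total + h) hdrop']
          rw [hmax']
          simp [hwinB, h10, List.any_cons, add_assoc]
      · -- s < 2: the window guard is dead and the range start is unchanged
        have hmax : max 2 (s : Int) = 2 := by omega
        have hmax' : max 2 ((s + 1 : Nat) : Int) = 2 := by push_cast; omega
        rw [if_neg h10, if_neg (by push_cast; omega), hcast, ih (s + 1) (total + h) hdrop']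
        rw [hmax, hmax']
        simp [h10, add_assoc]

-- Python max(xs, default=d) reaches a threshold above d iff some element does.
lemma maxD_ge (t d : Int) (hd : d < t) (xs : List Int) :
    decide (PySem.List.maxD xs (fun x => x) d ≥ t) = xs.any (fun x => decide (x ≥ t)) := by
  cases hm : PySem.List.max? xs (fun x : Int => x) with
  | none =>
    have : xs = [] := (PySem.List.max?_eq_none_iff xs (fun x => x)).mp hm
    subst this
    simp [PySem.List.maxD, PySem.List.max?, not_le.mpr hd]
  | some m =>
    have hmem : m ∈ xs := PySem.List.max?_mem hm
    have hmax : ∀ y ∈ xs, y ≤ m := PySem.List.max?_isMax hm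
    have hval : PySem.List.maxD xs (fun x => x) d = m := by
      simp [PySem.List.maxD, hm]
    rw [hval]
    by_cases hge : m ≥ t
    · have hany : xs.any (fun x => decide (x ≥ t)) = true :=
        List.any_eq_true.mpr ⟨m, hmem, by simpa using hge⟩
      rw [hany]
      simpa using hge
    · have hany : xs.any (fun x => decide (x ≥ t)) = false := by
        rw [List.any_eq_false]
        intro y hy
        have := hmax y hy
        simp only [decide_eq_true_eq]
        omega
      rw [hany]
      simpa using hge

lemma zip3Sums_nil_right (as bs : List Int) : zip3Sums as bs [] = [] := by
  cases as <;> cases bs <;> rfl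

-- The index-window disjunction over range(j+2, len) equals the window-sum list built from shifted views.
lemma range_eq_zip (hours : List Int) : ∀ (j : Nat),
    (PySem.List.pyRange ((j : Int) + 2) (hours.length : Int) 1).any (winB hours)
      = (zip3Sums (hours.drop j) (hours.drop (j + 1)) (hours.drop (j + 2))).any
          (fun w => decide (w ≥ 24)) := by
  intro j
  induction hn : hours.length - j generalizing j with
  | zero =>
    rw [PySem.List.pyRange_one_eq_nil (by omega)]
    rw [show hours.drop (j + 2) = [] from List.drop_eq_nil_iff.mpr (by omega)]
    rw [zip3Sums_nil_right]
    rfl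
  | succ n ih =>
    by_cases hbig : j + 2 < hours.length
    · have hd0 : hours.drop j = hours[j] :: hours.drop (j + 1) :=
        List.drop_eq_getElem_cons (by omega)
      have hd1 : hours.drop (j + 1) = hours[j + 1] :: hours.drop (j + 2) :=
        List.drop_eq_getElem_cons (by omega)
      have hd2 : hours.drop (j + 2) = hours[j + 2] :: hours.drop (j + 3) :=
        List.drop_eq_getElem_cons (by omega)
      rw [PySem.List.pyRange_one_cons (by omega)]
      rw [hd0, hd1, hd2]
      rw [show zip3Sums (hours[j] :: hours[j + 1] :: hours[j + 2] :: hours.drop (j + 3))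
            (hours[j + 1] :: hours[j + 2] :: hours.drop (j + 3)) (hours[j + 2] :: hours.drop (j + 3))
          = (hours[j] + hours[j + 1] + hours[j + 2]) ::
            zip3Sums (hours[j + 1] :: hours[j + 2] :: hours.drop (j + 3))
              (hours[j + 2] :: hours.drop (j + 3)) (hours.drop (j + 3)) from rfl]
      rw [← hd2, ← hd1]
      rw [List.any_cons, List.any_cons]
      have hwin : winB hours ((j : Int) + 2) = decide (hours[j] + hours[j + 1] + hours[j + 2] ≥ 24) := by
        have e0 : (j : Int) + 2 - 2 = ((j : Nat) : Int) := by push_cast; ring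
        have e1 : (j : Int) + 2 - 1 = ((j + 1 : Nat) : Int) := by push_cast; ring
        have e2 : (j : Int) + 2 = ((j + 2 : Nat) : Int) := by push_cast; ring_nf
        rw [winB, e0, e1]
        rw [show PySem.List.pyGetD hours ((j : Int) + 2) 0 = PySem.List.pyGetD hours ((j + 2 : Nat) : Int) 0 by rw [e2]]
        rw [PySem.List.pyGetD_natCast, PySem.List.pyGetD_natCast, PySem.List.pyGetD_natCast]
        rw [List.getD_eq_getElem _ _ (by omega), List.getD_eq_getElem _ _ (by omega),
          List.getD_eq_getElem _ _ (by omega)]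
      have hstart : (j : Int) + 2 + 1 = ((j + 1 : Nat) : Int) + 2 := by push_cast; ring
      have htail := ih (j + 1) (by omega)
      rw [hstart, htail, hwin]
    · rw [PySem.List.pyRange_one_eq_nil (by omega)]
      rw [show hours.drop (j + 2) = [] from List.drop_eq_nil_iff.mpr (by omega)]
      rw [zip3Sums_nil_right]
      rfl

-- ===== VERDICT (by name: the statement is the Claim_ definition above) =====
theorem too_much_screen_time_spec : Claim_equal_too_much_screen_time := by
  intro hours _
  show too_much_screen_time hours = too_much_screen_time_alt hours
  unfold too_much_screen_time
  show _ = (decide (PySem.List.maxD hours (fun x => x) 0 ≥ 10)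
    || decide (PySem.List.maxD (zip3Sums hours (PySem.List.slice hours (some 1) none)
        (PySem.List.slice hours (some 2) none)) (fun x => x) 0 ≥ 24)
    || decide (hours.sum ≥ 42))
  have h0 := tooA_loop_eq hours hours 0 0 (List.drop_zero)
  rw [show ((0 : Nat) : Int) = (0 : Int) from rfl, show max 2 (0 : Int) = 2 by omega, zero_add] at h0
  rw [h0]
  rw [PySem.List.slice_from hours (by omega : (0:Int) ≤ 1), PySem.List.slice_from hours (by omega : (0:Int) ≤ 2)]
  rw [maxD_ge 10 0 (by omega), maxD_ge 24 0 (by omega)]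
  have hz := range_eq_zip hours 0
  rw [show ((0 : Nat) : Int) + 2 = (2 : Int) from rfl, List.drop_zero] at hz
  rw [hz]
  rfl
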